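-- pv_equiv track=rewrite | github.com/EugeneVlg02/ProteolysisStructuralPrediction_development | scripts/6_add_edge_parts.py | split_SS
-- ===== SOURCE A (Python) =====
-- def split_SS(STR_values):
--     unstructured = ["U", "S", "T", "B"]
--     structured = ["E", "H", "G", "I"]
--     parts_STR = []
--     local_part = ''
--     for index, value in enumerate(STR_values):
--         if index != len(STR_values)-1:
--             if (value in unstructured and STR_values[index+1] in unstructured) or (value in structured and STR_values[index+1] in structured):
--                 local_part += value
--             else:
--                 local_part += value
--                 parts_STR.append(local_part)
--                 local_part = ''
--         else:
--             if (value in unstructured and STR_values[index-1] in unstructured) or (value in structured and STR_values[index-1] in structured):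
--                 local_part += value
--                 parts_STR.append(local_part)
--             else:
--                  parts_STR.append(value)
--     return parts_STR
-- ===== SOURCE B (Python) =====
-- def split_SS(STR_values):
--     def cat(v):
--         if v in ("U", "S", "T", "B"):
--             return "u"
--         if v in ("E", "H", "G", "I"):
--             return "s"
--         return None
--     parts = []
--     prev = None
--     for v in STR_values:
--         c = cat(v)
--         if parts and c is not None and c == prev:
--             parts[-1] += v
--         else:
--             parts.append(v)
--         prev = c
--     return parts
-- ===== Notes on version B (the rewrite author's own statement) =====
-- stated objective: simpler
-- what changed: Replaces A's forward look-ahead (index arithmetic into STR_values[index+1] plus a special backward-looking last-element branch) by a single backward pass with a category helper: keep the previous element's category and either extend the last emitted group in place or start a new one.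
import Mathlib
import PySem

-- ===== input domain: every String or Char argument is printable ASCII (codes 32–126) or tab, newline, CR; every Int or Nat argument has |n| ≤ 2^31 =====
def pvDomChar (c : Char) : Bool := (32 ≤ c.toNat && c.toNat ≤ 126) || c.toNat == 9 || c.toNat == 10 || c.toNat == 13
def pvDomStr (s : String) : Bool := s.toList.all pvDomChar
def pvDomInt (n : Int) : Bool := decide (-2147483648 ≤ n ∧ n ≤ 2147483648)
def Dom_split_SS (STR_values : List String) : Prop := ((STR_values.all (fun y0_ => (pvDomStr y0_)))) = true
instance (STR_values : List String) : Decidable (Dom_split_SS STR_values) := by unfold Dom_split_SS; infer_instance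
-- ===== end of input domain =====

-- B replaces A's forward look-ahead and special last-element branch by one backward
-- pass with a category helper that extends the last emitted group in place (simpler).


-- ===== PORT A =====
-- the two constant lists of A
def pvU : List String := ["U", "S", "T", "B"]
def pvS : List String := ["E", "H", "G", "I"]
-- Python's '(value in unstructured and w in unstructured) or (value in structured and w in structured)'
def condA (v w : String) : Bool :=
  (pvU.contains v && pvU.contains w) || (pvS.contains v && pvS.contains w)

-- the for-loop of A: state (parts_STR, local_part), index i, remaining items
def splitSSLoop (xs : List String) : Int → List String → List String × String → List String × String
  | _, [], st => st
  | i, v :: rest, (parts, locp) =>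
    if i ≠ PySem.List.len xs - 1 then
      if condA v ((PySem.List.pyGet? xs (i + 1)).getD "") then
        splitSSLoop xs (i + 1) rest (parts, locp ++ v)
      else
        splitSSLoop xs (i + 1) rest (parts ++ [locp ++ v], "")
    else
      if condA v ((PySem.List.pyGet? xs (i - 1)).getD "") then
        splitSSLoop xs (i + 1) rest (parts ++ [locp ++ v], locp ++ v)
      else
        splitSSLoop xs (i + 1) rest (parts ++ [v], locp)

def split_SS (STR_values : List String) : List String :=
  (splitSSLoop STR_values 0 STR_values ([], "")).1

-- ===== PORT B =====
-- B's cat helper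
def catB (v : String) : Option String :=
  if (["U", "S", "T", "B"] : List String).contains v then some "u"
  else if (["E", "H", "G", "I"] : List String).contains v then some "s"
  else none

-- B's for-loop: state (parts, prev)
def splitAltLoop : List String → List String → Option String → List String
  | [], parts, _ => parts
  | v :: rest, parts, prev =>
    let c := catB v
    if parts ≠ [] ∧ c.isSome ∧ c = prev then
      splitAltLoop rest (parts.dropLast ++ [(parts.getLast?.getD "") ++ v]) c
    else
      splitAltLoop rest (parts ++ [v]) c

def split_SS_alt (STR_values : List String) : List String :=
  splitAltLoop STR_values [] none

-- ===== PRECONDITION & SPEC =====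
def Spec_split_SS (STR_values : List String) (out : List String) : Prop := out = split_SS_alt STR_values
instance (STR_values : List String) (out : List String) : Decidable (Spec_split_SS STR_values out) := by unfold Spec_split_SS; infer_instance

-- ===== CLAIM (what is proved, stated in full; the proofs are below) =====
def Claim_equal_split_SS : Prop := ∀ (STR_values : List String), Dom_split_SS STR_values → Spec_split_SS STR_values (split_SS STR_values)

-- ===== LEMMAS AND PROOFS =====

lemma not_both_cats {v : String}
    (h1 : v = "U" ∨ v = "S" ∨ v = "T" ∨ v = "B")
    (h2 : v = "E" ∨ v = "H" ∨ v = "G" ∨ v = "I") : False := by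
  rcases h1 with h | h | h | h <;> subst h <;> revert h2 <;> decide

lemma condA_iff (v w : String) :
    condA v w = true ↔ ((catB v).isSome = true ∧ catB v = catB w) := by
  unfold condA catB pvU pvS
  simp only [List.contains_eq_mem, List.mem_cons, List.not_mem_nil, or_false,
    Bool.or_eq_true, Bool.and_eq_true, decide_eq_true_eq]
  by_cases h1 : v = "U" ∨ v = "S" ∨ v = "T" ∨ v = "B" <;>
  by_cases h2 : v = "E" ∨ v = "H" ∨ v = "G" ∨ v = "I" <;>
  by_cases h3 : w = "U" ∨ w = "S" ∨ w = "T" ∨ w = "B" <;>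
  by_cases h4 : w = "E" ∨ w = "H" ∨ w = "G" ∨ w = "I" <;>
    first
      | exact (not_both_cats h1 h2).elim
      | exact (not_both_cats h3 h4).elim
      | simp [h1, h2, h3, h4]

lemma condA_symm (v w : String) : condA v w = condA w v := by
  unfold condA
  rw [Bool.and_comm, Bool.and_comm (pvS.contains v)]

lemma catB_isSome_ne_empty {v : String} (h : (catB v).isSome = true) : v ≠ "" := by
  intro hv; subst hv; exact absurd h (by decide)

lemma condA_ne_empty {v w : String} (h : condA v w = true) : v ≠ "" :=
  catB_isSome_ne_empty ((condA_iff v w).1 h).1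

lemma str_append_ne_empty (s t : String) (h : s ≠ "") : s ++ t ≠ "" := by
  intro he
  apply h
  have hl := congrArg String.length he
  rw [String.length_append] at hl
  have : s.length = 0 := by simpa using Nat.eq_zero_of_add_eq_zero_right hl
  exact String.length_eq_zero_iff.mp this

-- the simulation invariant between A's loop state and B's
lemma loop_eq (xs : List String) :
    ∀ (rest : List String) (k : ℕ) (partsA partsB : List String) (locp : String),
      rest = xs.drop k →
      ((locp = "" ∧ partsB = partsA ∧
          (k = 0 ∨ ∀ v rest', rest = v :: rest' → condA (xs.getD (k - 1) "") v = false)) ∨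
        (locp ≠ "" ∧ partsB = partsA ++ [locp] ∧ 0 < k ∧
          ∃ v rest', rest = v :: rest' ∧ condA (xs.getD (k - 1) "") v = true)) →
      (splitSSLoop xs (k : Int) rest (partsA, locp)).1
        = splitAltLoop rest partsB (if k = 0 then none else catB (xs.getD (k - 1) "")) := by
  intro rest
  induction rest with
  | nil =>
    intro k partsA partsB locp _ hinv
    rcases hinv with ⟨_, hpb, _⟩ | ⟨_, _, _, v, rest', hvr, _⟩
    · simp [splitSSLoop, splitAltLoop, hpb]
    · exact absurd hvr (by simp)
  | cons v rest' ih =>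
    intro k partsA partsB locp hdrop hinv
    have hlen := congrArg List.length hdrop
    simp only [List.length_cons, List.length_drop] at hlen
    have hk : k < xs.length := by omega
    have hxk : xs[k]? = some v := by
      have h0 : (xs.drop k)[0]? = some v := by rw [← hdrop]; rfl
      simpa using h0
    have hgetk : xs.getD k "" = v := by rw [List.getD_eq_getElem?_getD, hxk]; rfl
    have hrest' : rest' = xs.drop (k + 1) := by
      have h1 := congrArg (List.drop 1) hdrop
      simpa [List.drop_drop, Nat.add_comm] using h1
    rw [show splitAltLoop (v :: rest') partsB
          (if k = 0 then none else catB (xs.getD (k - 1) "")) =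
        (if partsB ≠ [] ∧ (catB v).isSome = true ∧
            catB v = (if k = 0 then none else catB (xs.getD (k - 1) "")) then
          splitAltLoop rest' (partsB.dropLast ++ [(partsB.getLast?.getD "") ++ v]) (catB v)
        else splitAltLoop rest' (partsB ++ [v]) (catB v)) from rfl]
    cases rest' with
    | nil =>
      simp only [List.length_nil] at hlen
      have hnotne : ¬ ((k : Int) ≠ PySem.List.len xs - 1) := by
        rw [PySem.List.len_eq]; simp only [ne_eq, not_not]; omega
      simp only [splitSSLoop]
      rw [if_neg hnotne]
      by_cases hk0 : k = 0
      · subst hk0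
        have hxs : xs = [v] := by
          have h2 := hdrop; rw [List.drop_zero] at h2; exact h2.symm
        subst hxs
        rcases hinv with ⟨hloc, hpb, _⟩ | ⟨_, _, hkpos, _⟩
        · subst hloc
          have hBfalse : ¬ (partsB ≠ [] ∧ (catB v).isSome = true ∧
              catB v = (if 0 = 0 then none else catB (([v] : List String).getD (0 - 1) ""))) := by
            rintro ⟨_, hsome, hceq⟩
            rw [if_pos rfl] at hceq; rw [hceq] at hsome; simp at hsome
          rw [if_neg hBfalse]
          have hpg : (PySem.List.pyGet? [v] (((0 : ℕ) : Int) - 1)).getD "" = v := by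
            norm_num [PySem.List.pyGet?_neg_one]
          rw [hpg]
          cases hc : condA v v <;>
            simp [splitAltLoop, String.empty_append, hpb]
        · omega
      · have hprevget : (PySem.List.pyGet? xs ((k : Int) - 1)).getD "" = xs.getD (k - 1) "" := by
          have hc1 : ((k : Int) - 1) = ((k - 1 : Nat) : Int) := by omega
          rw [hc1, PySem.List.pyGet?_natCast]
          exact List.getD_eq_getElem?_getD.symm
        rw [hprevget, condA_symm]
        rcases hinv with ⟨hloc, hpb, hprevc⟩ | ⟨hloc, hpb, hkpos, v0, rest0, heq0, hcA⟩
        · subst hloc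
          rcases hprevc with h | hall
          · exact absurd h hk0
          have hcf := hall v [] rfl
          have hnc : ¬ (condA (xs.getD (k - 1) "") v = true) := by
            rw [hcf]; simp
          rw [if_neg hnc]
          have hBfalse : ¬ (partsB ≠ [] ∧ (catB v).isSome = true ∧
              catB v = (if k = 0 then none else catB (xs.getD (k - 1) ""))) := by
            rintro ⟨_, hsome, hceq⟩
            rw [if_neg hk0] at hceq
            have hct : condA (xs.getD (k - 1) "") v = true :=
              (condA_iff _ v).2 ⟨by rw [← hceq]; exact hsome, hceq.symm⟩
            rw [hcf] at hct; exact Bool.noConfusion hct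
          rw [if_neg hBfalse]
          simp [splitAltLoop, hpb]
        · injection heq0 with hv0 _; subst hv0
          rw [if_pos hcA]
          have hiff := (condA_iff (xs.getD (k - 1) "") v).1 hcA
          have hBtrue : partsB ≠ [] ∧ (catB v).isSome = true ∧
              catB v = (if k = 0 then none else catB (xs.getD (k - 1) "")) :=
            ⟨by simp [hpb], by rw [← hiff.2]; exact hiff.1, by rw [if_neg hk0]; exact hiff.2.symm⟩
          rw [if_pos hBtrue, hpb, List.dropLast_concat, List.getLast?_concat]
          simp [splitAltLoop]
    | cons w rest'' =>
      have hlen2 := congrArg List.length hrest'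
      simp only [List.length_cons, List.length_drop] at hlen2
      have hk1 : k + 1 < xs.length := by omega
      have hxk1 : xs[k + 1]? = some w := by
        have h0 : (xs.drop (k + 1))[0]? = some w := by rw [← hrest']; rfl
        simpa using h0
      have hne : ((k : Int) ≠ PySem.List.len xs - 1) := by
        rw [PySem.List.len_eq]; omega
      have hnxt : (PySem.List.pyGet? xs ((k : Int) + 1)).getD "" = w := by
        have hc1 : ((k : Int) + 1) = ((k + 1 : Nat) : Int) := by push_cast; ring
        rw [hc1, PySem.List.pyGet?_natCast, hxk1]; rfl
      have hcast : (((k + 1 : Nat)) : Int) = (k : Int) + 1 := by push_cast; ring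
      have hprev1 : (if k + 1 = 0 then (none : Option String)
          else catB (xs.getD (k + 1 - 1) "")) = catB v := by
        rw [if_neg (by omega : ¬ k + 1 = 0), Nat.add_sub_cancel, hgetk]
      simp only [splitSSLoop]
      rw [if_pos hne, hnxt]
      rcases hinv with ⟨hloc, hpb, hprevc⟩ | ⟨hloc, hpb, hkpos, v0, rest0, heq0, hcA⟩
      · subst hloc
        have hBfalse : ¬ (partsB ≠ [] ∧ (catB v).isSome = true ∧
            catB v = (if k = 0 then none else catB (xs.getD (k - 1) ""))) := by
          rintro ⟨_, hsome, hceq⟩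
          by_cases hk0 : k = 0
          · rw [if_pos hk0] at hceq; rw [hceq] at hsome; simp at hsome
          · rw [if_neg hk0] at hceq
            rcases hprevc with h | hall
            · exact hk0 h
            · have hct : condA (xs.getD (k - 1) "") v = true :=
                (condA_iff _ v).2 ⟨by rw [← hceq]; exact hsome, hceq.symm⟩
              rw [hall v (w :: rest'') rfl] at hct; exact Bool.noConfusion hct
        rw [if_neg hBfalse, hpb]
        cases hc : condA v w with
        | true =>
          rw [if_pos rfl, String.empty_append]
          have hih := ih (k + 1) partsA (partsA ++ [v]) v hrest'
            (Or.inr ⟨condA_ne_empty hc, rfl, by omega,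
              ⟨w, rest'', rfl, by rw [Nat.add_sub_cancel, hgetk]; exact hc⟩⟩)
          rw [hprev1] at hih
          rw [← hcast]; exact hih
        | false =>
          rw [if_neg (by simp : ¬ (false = true)), String.empty_append]
          have hih := ih (k + 1) (partsA ++ [v]) (partsA ++ [v]) "" hrest'
            (Or.inl ⟨rfl, rfl, Or.inr (by
              rintro v' rest0 heq'
              injection heq' with h1 h2; subst h1
              rw [Nat.add_sub_cancel, hgetk]; exact hc)⟩)
          rw [hprev1] at hih
          rw [← hcast]; exact hih
      · injection heq0 with hv0 _; subst hv0
        have hiff := (condA_iff (xs.getD (k - 1) "") v).1 hcA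
        have hBtrue : partsB ≠ [] ∧ (catB v).isSome = true ∧
            catB v = (if k = 0 then none else catB (xs.getD (k - 1) "")) :=
          ⟨by simp [hpb], by rw [← hiff.2]; exact hiff.1,
            by rw [if_neg (by omega : ¬ k = 0)]; exact hiff.2.symm⟩
        rw [if_pos hBtrue, hpb, List.dropLast_concat, List.getLast?_concat]
        simp only [Option.getD_some]
        cases hc : condA v w with
        | true =>
          rw [if_pos rfl]
          have hih := ih (k + 1) partsA (partsA ++ [locp ++ v]) (locp ++ v) hrest'
            (Or.inr ⟨str_append_ne_empty locp v hloc, rfl, by omega,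
              ⟨w, rest'', rfl, by rw [Nat.add_sub_cancel, hgetk]; exact hc⟩⟩)
          rw [hprev1] at hih
          rw [← hcast]; exact hih
        | false =>
          rw [if_neg (by simp : ¬ (false = true))]
          have hih := ih (k + 1) (partsA ++ [locp ++ v]) (partsA ++ [locp ++ v]) "" hrest'
            (Or.inl ⟨rfl, rfl, Or.inr (by
              rintro v' rest0 heq'
              injection heq' with h1 h2; subst h1
              rw [Nat.add_sub_cancel, hgetk]; exact hc)⟩)
          rw [hprev1] at hih
          rw [← hcast]; exact hih

-- ===== VERDICT (by name: the statement is the Claim_ definition above) =====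
theorem split_SS_spec : Claim_equal_split_SS := by
  intro xs _
  unfold Spec_split_SS split_SS split_SS_alt
  have := loop_eq xs xs 0 [] [] "" (by simp) (Or.inl ⟨rfl, rfl, Or.inl rfl⟩)
  simpa using this
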